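-- pv_equiv track=rewrite | github.com/tayyabmunir/CPT_S-570---Machine-Learning | Q1.py | Generate_Vocabulary
-- ===== SOURCE A (Python) =====
-- def Generate_Vocabulary(FC_Lines,Stop):
--     W=[]
--     for line in FC_Lines:
--         W.extend(line.strip().split(' '))
--     W=sorted(W)
--     Vocabulary=[]
--     for i in range(len(W)):
--         if W[i] not in Stop:
--             if W[i] not in Vocabulary:
--                 Vocabulary.append(W[i])
--     Count=[]
--     for i in range(len(Vocabulary)):
--         CNT=0
--         for j in range(len(W)):
--             if(Vocabulary[i]==W[j]):
--                 CNT=CNT+1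
--         Count.append(CNT)
--     return Vocabulary,Count
-- ===== SOURCE B (Python) =====
-- def Generate_Vocabulary(FC_Lines, Stop):
--     words = []
--     for line in FC_Lines:
--         words.extend(line.strip().split(' '))
--     words.sort()
--     stop = set(Stop)
--     Vocabulary = []
--     Count = []
--     i = 0
--     n = len(words)
--     while i < n:
--         j = i + 1
--         while j < n and words[j] == words[i]:
--             j += 1
--         if words[i] not in stop:
--             Vocabulary.append(words[i])
--             Count.append(j - i)
--         i = j
--     return Vocabulary, Count
-- ===== Notes on version B (the rewrite author's own statement) =====
-- stated objective: faster
-- what changed: Replaces A's quadratic 'not in Vocabulary' dedup scan and its V*N counting loop by one linear pass over the sorted word list that counts consecutive runs, with Stop held in a set.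
import Mathlib
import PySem

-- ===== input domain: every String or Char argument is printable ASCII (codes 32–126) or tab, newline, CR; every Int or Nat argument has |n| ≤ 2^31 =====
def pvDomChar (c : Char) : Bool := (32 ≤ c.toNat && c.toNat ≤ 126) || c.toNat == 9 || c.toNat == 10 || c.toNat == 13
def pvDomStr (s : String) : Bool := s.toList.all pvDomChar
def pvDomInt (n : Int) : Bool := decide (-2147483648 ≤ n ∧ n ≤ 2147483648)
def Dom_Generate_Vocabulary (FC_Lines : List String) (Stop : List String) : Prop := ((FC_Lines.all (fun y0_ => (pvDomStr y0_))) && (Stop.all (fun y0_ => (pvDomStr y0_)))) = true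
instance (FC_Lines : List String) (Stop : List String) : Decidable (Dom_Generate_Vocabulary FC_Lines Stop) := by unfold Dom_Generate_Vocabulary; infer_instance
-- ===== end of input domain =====

-- B replaces A's quadratic membership/counting scans by one run-counting pass over the sorted words (faster, asymptotic).

-- ===== PORT A =====
-- split(' ') has a nonempty separator, so Str.split? is always some; .getD [] is never taken.
def Generate_Vocabulary (FC_Lines : List String) (Stop : List String) : List String × List Int :=
  let W := FC_Lines.foldl (fun w line => w ++ ((PySem.Str.split? (PySem.Str.strip line) " ").getD [])) []
  let W := PySem.List.sorted W (fun x => x) false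
  let Vocabulary := W.foldl (fun voc w =>
    if Stop.contains w then voc
    else if voc.contains w then voc else voc ++ [w]) []
  let Count := Vocabulary.map (fun v => W.foldl (fun cnt w => if v == w then cnt + 1 else cnt) (0 : Int))
  (Vocabulary, Count)

-- ===== PORT B =====
-- the outer/inner while loop of Source B: consume one run of equal words from the sorted list per step
def pvRuns (words : List String) (stop : PySem.Set String) : List String × List Int :=
  match words with
  | [] => ([], [])
  | w :: rest =>
      let same := rest.takeWhile (fun x => x == w)
      let rest' := rest.dropWhile (fun x => x == w)
      let (vs, cs) := pvRuns rest' stop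
      if PySem.Set.contains stop w then (vs, cs)
      else (w :: vs, ((1 + same.length : Nat) : Int) :: cs)
termination_by words.length
decreasing_by
  have := (List.dropWhile_sublist (l := rest) (p := fun x => x == w)).length_le
  simp; omega

def Generate_Vocabulary_alt (FC_Lines : List String) (Stop : List String) : List String × List Int :=
  let words := FC_Lines.foldl (fun w line => w ++ ((PySem.Str.split? (PySem.Str.strip line) " ").getD [])) []
  let words := PySem.List.sorted words (fun x => x) false
  pvRuns words (PySem.Set.ofList Stop)

-- ===== PRECONDITION & SPEC =====
def Spec_Generate_Vocabulary (FC_Lines : List String) (Stop : List String) (out : List String × List Int) : Prop := out = Generate_Vocabulary_alt FC_Lines Stop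
instance (FC_Lines : List String) (Stop : List String) (out : List String × List Int) : Decidable (Spec_Generate_Vocabulary FC_Lines Stop out) := by unfold Spec_Generate_Vocabulary; infer_instance

-- ===== CLAIM (what is proved, stated in full; the proofs are below) =====
def Claim_equal_Generate_Vocabulary : Prop := ∀ (FC_Lines : List String) (Stop : List String), Dom_Generate_Vocabulary FC_Lines Stop → Spec_Generate_Vocabulary FC_Lines Stop (Generate_Vocabulary FC_Lines Stop)

-- ===== LEMMAS AND PROOFS =====

theorem pvRuns_cons (w : String) (rest : List String) (stop : PySem.Set String) :
    pvRuns (w :: rest) stop =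
      (if PySem.Set.contains stop w then (pvRuns (rest.dropWhile (fun x => x == w)) stop)
       else ((w :: (pvRuns (rest.dropWhile (fun x => x == w)) stop).1),
             ((1 + (rest.takeWhile (fun x => x == w)).length : Nat) : Int)
               :: (pvRuns (rest.dropWhile (fun x => x == w)) stop).2)) := by
  rw [pvRuns.eq_def]

theorem pvRuns_subset_aux (stop : PySem.Set String) (n : Nat) :
    ∀ S : List String, S.length ≤ n → ∀ x ∈ (pvRuns S stop).1, x ∈ S := by
  induction n with
  | zero =>
      intro S h
      have : S = [] := List.eq_nil_of_length_eq_zero (Nat.le_zero.mp h)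
      subst this; simp [pvRuns]
  | succ n ih =>
      intro S hlen x hx
      match S with
      | [] => simp [pvRuns] at hx
      | w :: rest =>
        rw [pvRuns_cons] at hx
        have hd : (rest.dropWhile (fun x => x == w)).length ≤ n := by
          have := (List.dropWhile_sublist (l := rest) (p := fun x => x == w)).length_le
          simp at hlen; omega
        have hsub : ∀ y ∈ rest.dropWhile (fun x => x == w), y ∈ rest :=
          fun y hy => (List.dropWhile_sublist _).mem hy
        split at hx
        · exact List.mem_cons_of_mem _ (hsub x (ih _ hd x hx))
        · rcases List.mem_cons.mp hx with h | h
          · simp [h]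
          · exact List.mem_cons_of_mem _ (hsub x (ih _ hd x h))

theorem pvRuns_subset (S : List String) (stop : PySem.Set String) :
    ∀ x ∈ (pvRuns S stop).1, x ∈ S :=
  pvRuns_subset_aux stop S.length S le_rfl

theorem not_mem_dropWhile_of_sorted (S : List String) (w : String)
    (hp : S.Pairwise (· ≤ ·)) (hw : ∀ x ∈ S, w ≤ x) :
    w ∉ S.dropWhile (fun x => x == w) := by
  induction S with
  | nil => simp
  | cons x t ih =>
      by_cases hx : x = w
      · subst hx
        rw [List.dropWhile_cons_of_pos (by simp)]
        exact ih hp.of_cons (fun y hy => hw y (List.mem_cons_of_mem _ hy))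
      · rw [List.dropWhile_cons_of_neg (by simpa using hx)]
        intro hmem
        rcases List.mem_cons.mp hmem with h | h
        · exact hx h.symm
        · have h1 : x ≤ w := (List.pairwise_cons.mp hp).1 w h
          have h2 : w ≤ x := hw x List.mem_cons_self
          exact hx (le_antisymm h1 h2)

theorem foldl_count_eq (v : String) (S : List String) (a : Int) :
    S.foldl (fun cnt w => if v == w then cnt + 1 else cnt) a = a + (S.count v : Int) := by
  induction S generalizing a with
  | nil => simp
  | cons x t ih =>
      simp only [List.foldl_cons, List.count_cons, ih]
      by_cases h : v = x
      · simp [h]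
        ring
      · have hx : (x == v) = false := by simpa [beq_iff_eq] using fun e => h e.symm
        simp [beq_iff_eq, h, hx]

theorem foldl_id_prefix (f : List String → String → List String) (l r : List String)
    (acc : List String) (h : ∀ a, ∀ x ∈ l, f a x = a) :
    (l ++ r).foldl f acc = r.foldl f acc := by
  induction l generalizing acc with
  | nil => simp
  | cons x t ih =>
      simp only [List.cons_append, List.foldl_cons, h acc x List.mem_cons_self]
      exact ih _ (fun a y hy => h a y (List.mem_cons_of_mem _ hy))

theorem pvRuns_main_aux (Stop : List String) (n : Nat) :
    ∀ S : List String, S.length ≤ n → S.Pairwise (· ≤ ·) →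
    (∀ acc : List String, (∀ a ∈ acc, a ∉ S) →
      S.foldl (fun voc w => if Stop.contains w then voc
        else if voc.contains w then voc else voc ++ [w]) acc
        = acc ++ (pvRuns S (PySem.Set.ofList Stop)).1) ∧
    (pvRuns S (PySem.Set.ofList Stop)).2
        = (pvRuns S (PySem.Set.ofList Stop)).1.map (fun v => (S.count v : Int)) := by
  induction n with
  | zero =>
      intro S h _
      have : S = [] := List.eq_nil_of_length_eq_zero (Nat.le_zero.mp h)
      subst this; simp [pvRuns]
  | succ n ih =>
      intro S hlen hp
      match S with
      | [] => simp [pvRuns]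
      | w :: rest =>
        set same := rest.takeWhile (fun x => x == w) with hsame_def
        set rest' := rest.dropWhile (fun x => x == w) with hrest'_def
        have hsplit : same ++ rest' = rest := List.takeWhile_append_dropWhile
        have hsame : ∀ x ∈ same, x = w := by
          intro x hx
          have := List.mem_takeWhile_imp hx
          simpa [beq_iff_eq] using this
        have hwle : ∀ x ∈ rest, w ≤ x := (List.pairwise_cons.mp hp).1
        have hptail : rest.Pairwise (· ≤ ·) := hp.of_cons
        have hp' : rest'.Pairwise (· ≤ ·) := hptail.sublist (List.dropWhile_sublist _)
        have hnw : w ∉ rest' := not_mem_dropWhile_of_sorted rest w hptail hwle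
        have hsub' : ∀ y ∈ rest', y ∈ rest := fun y hy => (List.dropWhile_sublist _).mem hy
        have hlen' : rest'.length ≤ n := by
          have h := (List.dropWhile_sublist (l := rest) (p := fun x => x == w)).length_le
          rw [← hrest'_def] at h
          simp at hlen; omega
        obtain ⟨ihf, ihc⟩ := ih rest' hlen' hp'
        have hrsub := pvRuns_subset rest' (PySem.Set.ofList Stop)
        have hcnt : ∀ v ∈ (pvRuns rest' (PySem.Set.ofList Stop)).1,
            ((w :: rest).count v : Int) = (rest'.count v : Int) := by
          intro v hv
          have hvr : v ∈ rest' := hrsub v hv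
          have hvw : v ≠ w := fun e => hnw (e ▸ hvr)
          have hvs : v ∉ same := fun hs => hvw (hsame v hs)
          rw [← hsplit, List.count_cons, List.count_append]
          simp [List.count_eq_zero.mpr hvs, beq_iff_eq, Ne.symm hvw]
        have hmap : (pvRuns rest' (PySem.Set.ofList Stop)).1.map (fun v => (rest'.count v : Int))
            = (pvRuns rest' (PySem.Set.ofList Stop)).1.map (fun v => ((w :: rest).count v : Int)) :=
          List.map_congr_left (fun v hv => (hcnt v hv).symm)
        have hcontains : PySem.Set.contains (PySem.Set.ofList Stop) w = Stop.contains w := by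
          simp
        rw [pvRuns_cons]
        simp only [← hsame_def, ← hrest'_def, hcontains]
        by_cases hstop : Stop.contains w = true
        · -- w is a stopword: the whole leading run is skipped by both sides
          rw [if_pos hstop]
          refine ⟨?_, by rw [ihc, hmap]⟩
          intro acc hacc
          have hform : w :: rest = (w :: same) ++ rest' := by simp [hsplit]
          rw [hform, foldl_id_prefix _ (w :: same) rest' acc ?_]
          · exact ihf acc (fun a ha hmem => hacc a ha (List.mem_cons_of_mem _ (hsub' a hmem)))
          · intro a x hx
            have hxw : x = w := by
              rcases List.mem_cons.mp hx with h | h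
              · exact h
              · exact hsame x h
            show (if Stop.contains x = true then a
              else if a.contains x = true then a else a ++ [x]) = a
            rw [hxw, if_pos hstop]
        · -- w is kept: it heads a new run
          rw [if_neg hstop]
          have hhead : (((w :: rest).count w : Nat) : Int) = ((1 + same.length : Nat) : Int) := by
            rw [← hsplit, List.count_cons, List.count_append]
            have h1 : same.count w = same.length :=
              List.count_eq_length.mpr (fun b hb => (hsame b hb).symm)
            have h2 : rest'.count w = 0 := List.count_eq_zero.mpr hnw
            simp [h1, h2]; omega
          refine ⟨?_, ?_⟩
          · intro acc hacc
            have hform : w :: rest = (w :: same) ++ rest' := by simp [hsplit]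
            rw [hform]
            have hwacc : acc.contains w = false := by
              simp only [List.contains_eq_mem, decide_eq_false_iff_not]
              exact fun h => hacc w h List.mem_cons_self
            have hid : ∀ (l : List String) (a : List String), (∀ x ∈ l, x = w) → w ∈ a →
                l.foldl (fun voc w => if Stop.contains w then voc
                  else if voc.contains w then voc else voc ++ [w]) a = a := by
              intro l
              induction l with
              | nil => intro a _ _; simp
              | cons x t iht =>
                  intro a hall hw
                  have hx : x = w := hall x List.mem_cons_self
                  simp only [List.foldl_cons, hx]
                  rw [if_neg hstop, if_pos (by simp [List.contains_eq_mem, hw])]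
                  exact iht a (fun y hy => hall y (List.mem_cons_of_mem _ hy)) hw
            have step1 : ((w :: same) ++ rest').foldl (fun voc w => if Stop.contains w then voc
                else if voc.contains w then voc else voc ++ [w]) acc
                = rest'.foldl (fun voc w => if Stop.contains w then voc
                else if voc.contains w then voc else voc ++ [w]) (acc ++ [w]) := by
              simp only [List.cons_append, List.foldl_cons]
              rw [if_neg hstop, if_neg (by simp [List.contains_eq_mem]; exact fun h => hacc w h List.mem_cons_self)]
              rw [List.foldl_append, hid same (acc ++ [w]) hsame (by simp)]
            rw [step1, ihf (acc ++ [w]) ?_]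
            · simp
            · intro a ha hmem
              rcases List.mem_append.mp ha with h | h
              · exact hacc a h (List.mem_cons_of_mem _ (hsub' a hmem))
              · simp at h; exact hnw (h ▸ hmem)
          · rw [List.map_cons, ← hhead, ihc, hmap]


-- ===== VERDICT (by name: the statement is the Claim_ definition above) =====
theorem Generate_Vocabulary_spec : Claim_equal_Generate_Vocabulary := by
  intro FC_Lines Stop _
  unfold Spec_Generate_Vocabulary Generate_Vocabulary Generate_Vocabulary_alt
  simp only []
  set W0 := FC_Lines.foldl (fun w line => w ++ ((PySem.Str.split? (PySem.Str.strip line) " ").getD [])) [] with hW0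
  set S := PySem.List.sorted W0 (fun x => x) false with hS
  have hp : S.Pairwise (· ≤ ·) := by
    simpa using PySem.List.sorted_pairwise (xs := W0) (key := fun x => x)
  obtain ⟨hf, hc⟩ := pvRuns_main_aux Stop S.length S le_rfl hp
  have h1 : S.foldl (fun voc w => if Stop.contains w then voc
      else if voc.contains w then voc else voc ++ [w]) []
      = (pvRuns S (PySem.Set.ofList Stop)).1 := by
    simpa using hf [] (by simp)
  have h2 : (pvRuns S (PySem.Set.ofList Stop)).1.map
        (fun v => S.foldl (fun cnt w => if v == w then cnt + 1 else cnt) (0 : Int))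
      = (pvRuns S (PySem.Set.ofList Stop)).2 := by
    rw [hc]
    apply List.map_congr_left
    intro v _
    rw [foldl_count_eq]
    simp
  rw [h1, h2]
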